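-- pv_equiv track=rewrite | github.com/jobin2201/numoni-mutlidb-system | part4_analysing_the_filters/advanced_filter_executor.py | _pick_reference_column
-- ===== SOURCE A (Python) =====
-- from typing import List, Dict, Any, Optional, Callable
--
-- def _pick_reference_column(rows: List[Dict[str, Any]]) -> Optional[str]:
--     if not rows:
--         return None
--     for col in rows[0].keys():
--         low = col.lower()
--         if 'reference' in low and 'id' in low:
--             return col
--     for col in rows[0].keys():
--         if 'reference' in col.lower():
--             return col
--     return None
-- ===== SOURCE B (Python) =====
-- from typing import List, Dict, Any, Optional
--
-- def _pick_reference_column(rows: List[Dict[str, Any]]) -> Optional[str]: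
--     if not rows:
--         return None
--     best_both = None
--     best_ref = None
--     for col in rows[0].keys():
--         low = col.lower()
--         if best_both is None and 'reference' in low and 'id' in low:
--             best_both = col
--         if best_ref is None and 'reference' in low:
--             best_ref = col
--     return best_both if best_both is not None else best_ref
-- ===== Notes on version B (the rewrite author's own statement) =====
-- stated objective: alternative
-- what changed: Replaces A's two sequential scans over the column names (first for reference+id, then for reference) with a single pass maintaining two first-match accumulators and combining them after the loop.
import Mathlib
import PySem

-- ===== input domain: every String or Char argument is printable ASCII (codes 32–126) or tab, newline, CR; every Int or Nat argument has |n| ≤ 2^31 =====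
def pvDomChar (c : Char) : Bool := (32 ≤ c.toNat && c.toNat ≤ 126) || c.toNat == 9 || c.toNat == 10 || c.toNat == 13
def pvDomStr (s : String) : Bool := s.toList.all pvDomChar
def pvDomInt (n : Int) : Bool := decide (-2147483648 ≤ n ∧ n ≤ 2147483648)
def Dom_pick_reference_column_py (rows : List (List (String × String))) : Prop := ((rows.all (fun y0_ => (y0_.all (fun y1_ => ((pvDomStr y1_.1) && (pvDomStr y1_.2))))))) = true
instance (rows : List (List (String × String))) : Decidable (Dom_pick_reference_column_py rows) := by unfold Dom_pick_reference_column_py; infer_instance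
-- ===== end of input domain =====

-- B collapses A's two sequential key scans into one pass with two first-match accumulators (alternative decomposition, same cost).


-- ===== PORT A =====
-- two sequential scans over rows[0].keys(): first for 'reference' and 'id', then for 'reference'
def pick_reference_column_py (rows : List (List (String × String))) : Option String :=
  match rows with
  | [] => none
  | r0 :: _ =>
    match r0.map Prod.fst |>.find? (fun col =>
        PySem.Str.isIn "reference" (PySem.Str.lower col) &&
        PySem.Str.isIn "id" (PySem.Str.lower col)) with
    | some col => some col
    | none =>
      r0.map Prod.fst |>.find? (fun col => PySem.Str.isIn "reference" (PySem.Str.lower col))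

-- ===== PORT B =====
-- single pass keeping the first reference+id match and the first reference match
def pickAltStep (acc : Option String × Option String) (col : String) : Option String × Option String :=
  let low := PySem.Str.lower col
  let bb := if acc.1.isNone && PySem.Str.isIn "reference" low && PySem.Str.isIn "id" low
            then some col else acc.1
  let br := if acc.2.isNone && PySem.Str.isIn "reference" low then some col else acc.2
  (bb, br)

def pick_reference_column_py_alt (rows : List (List (String × String))) : Option String :=
  match rows with
  | [] => none
  | r0 :: _ =>
    let st := (r0.map Prod.fst).foldl pickAltStep (none, none)
    match st.1 with
    | some c => some c
    | none => st.2

-- ===== PRECONDITION & SPEC =====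
def Spec_pick_reference_column_py (rows : List (List (String × String))) (out : Option String) : Prop := out = pick_reference_column_py_alt rows
instance (rows : List (List (String × String))) (out : Option String) : Decidable (Spec_pick_reference_column_py rows out) := by unfold Spec_pick_reference_column_py; infer_instance

-- ===== CLAIM (what is proved, stated in full; the proofs are below) =====
def Claim_equal_pick_reference_column_py : Prop := ∀ (rows : List (List (String × String))), Dom_pick_reference_column_py rows → Spec_pick_reference_column_py rows (pick_reference_column_py rows)

-- ===== LEMMAS AND PROOFS =====

-- ===== VERDICT (by name: the statement is the Claim_ definition above) =====
theorem fold_invariant (ks : List String) (b r : Option String) :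
    ks.foldl pickAltStep (b, r) =
      ((b.or (ks.find? (fun col =>
          PySem.Str.isIn "reference" (PySem.Str.lower col) &&
          PySem.Str.isIn "id" (PySem.Str.lower col)))),
       (r.or (ks.find? (fun col => PySem.Str.isIn "reference" (PySem.Str.lower col))))) := by
  induction ks generalizing b r with
  | nil => cases b <;> cases r <;> rfl
  | cons k ks ih =>
    simp only [List.foldl_cons]
    cases hr : PySem.Str.isIn "reference" (PySem.Str.lower k) <;>
    cases hi : PySem.Str.isIn "id" (PySem.Str.lower k) <;>
    cases b <;> cases r <;>
      simp only [pickAltStep, hr, hi, ih, List.find?_cons, Option.isNone_none,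
        Option.isNone_some, Bool.true_and, Bool.false_and, Bool.and_true, Bool.and_false,
        Bool.and_self, Option.none_or, Option.some_or, Bool.false_eq_true, eq_self_iff_true, if_true, if_false, ite_true, ite_false, reduceIte]

theorem pick_reference_column_py_spec : Claim_equal_pick_reference_column_py := by
  intro rows _
  unfold Spec_pick_reference_column_py pick_reference_column_py pick_reference_column_py_alt
  cases rows with
  | nil => rfl
  | cons r0 rest =>
    simp only [fold_invariant, Option.or]
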